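-- pv_equiv track=rewrite | github.com/sandeepreddygantla/Meetings-AI | src/ai/query_processor.py | detect_summary_query
-- ===== SOURCE A (Python) =====
-- def detect_summary_query(query: str) -> bool:
--     """
--     Detect if a query is asking for a summary or comprehensive overview.
--
--     Args:
--         query: User query to analyze
--
--     Returns:
--         True if this appears to be a summary query
--     """
--     summary_keywords = [
--         'summary', 'summarize', 'overview', 'recap', 'what happened',
--         'key points', 'main topics', 'highlights', 'takeaways',
--         'comprehensive', 'complete', 'all', 'everything', 'total'
--     ]
--
--     query_lower = query.lower()
--     return any(keyword in query_lower for keyword in summary_keywords)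
-- ===== SOURCE B (Python) =====
-- def detect_summary_query(query: str) -> bool:
--     """
--     Detect if a query is asking for a summary or comprehensive overview.
--
--     Single left-to-right pass over the lowercased query: at each position,
--     test whether any keyword starts there (instead of one full substring
--     scan per keyword).
--     """
--     summary_keywords = [
--         'summary', 'summarize', 'overview', 'recap', 'what happened',
--         'key points', 'main topics', 'highlights', 'takeaways',
--         'comprehensive', 'complete', 'all', 'everything', 'total'
--     ]
--
--     s = query.lower()
--     for i in range(len(s) + 1):
--         if any(s.startswith(kw, i) for kw in summary_keywords):
--             return True
--     return False
-- ===== Notes on version B (the rewrite author's own statement) =====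
-- stated objective: alternative
-- what changed: A runs one full substring scan per keyword ('kw in s', k passes over the query); B makes a single pass over the positions of the lowercased query and at each position checks whether any keyword starts there (startswith at offset), inverting the loop nesting and removing the per-keyword substring search.
import Mathlib
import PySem

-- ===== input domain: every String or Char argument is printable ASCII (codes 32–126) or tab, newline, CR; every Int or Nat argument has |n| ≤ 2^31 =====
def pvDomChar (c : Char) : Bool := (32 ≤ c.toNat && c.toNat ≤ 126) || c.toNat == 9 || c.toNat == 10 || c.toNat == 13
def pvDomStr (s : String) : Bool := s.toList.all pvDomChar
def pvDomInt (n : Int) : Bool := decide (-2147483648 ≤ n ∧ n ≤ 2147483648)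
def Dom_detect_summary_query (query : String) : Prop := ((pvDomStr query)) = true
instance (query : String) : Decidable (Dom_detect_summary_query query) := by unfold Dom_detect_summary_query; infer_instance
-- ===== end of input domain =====

-- ===== PORT A =====
-- B replaces A's per-keyword substring scans by one positional pass with prefix checks (alternative decomposition, same cost).
def summaryKeywords : List String :=
  ["summary", "summarize", "overview", "recap", "what happened",
   "key points", "main topics", "highlights", "takeaways",
   "comprehensive", "complete", "all", "everything", "total"]

def detect_summary_query (query : String) : Bool :=
  let query_lower := PySem.Str.lower query
  summaryKeywords.any (fun keyword => PySem.Str.isIn keyword query_lower)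

-- ===== PORT B =====
-- for i in range(len(s)+1): if any(s.startswith(kw, i) …): return True
-- s.startswith(kw, i) is the prefix test on the tail s[i:], exact via PySem.Chars.startswith on the drop
def detect_summary_query_alt (query : String) : Bool :=
  let s : List Char := (PySem.Str.lower query).toList
  (List.range (s.length + 1)).any (fun i =>
    summaryKeywords.any (fun kw => PySem.Chars.startswith (s.drop i) kw.toList))

-- ===== PRECONDITION & SPEC =====
def Spec_detect_summary_query (query : String) (out : Bool) : Prop := out = detect_summary_query_alt query
instance (query : String) (out : Bool) : Decidable (Spec_detect_summary_query query out) := by unfold Spec_detect_summary_query; infer_instance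

-- ===== CLAIM (what is proved, stated in full; the proofs are below) =====
def Claim_equal_detect_summary_query : Prop := ∀ (query : String), Dom_detect_summary_query query → Spec_detect_summary_query query (detect_summary_query query)

-- ===== LEMMAS AND PROOFS =====

-- the positional pass finds a keyword iff some keyword is a substring
theorem scan_any_eq (kws : List String) (q : List Char) :
    ((List.range (q.length + 1)).any (fun i =>
        kws.any (fun kw => PySem.Chars.startswith (q.drop i) kw.toList)))
      = kws.any (fun kw => PySem.Chars.isIn kw.toList q) := by
  rw [Bool.eq_iff_iff]
  simp only [List.any_eq_true, List.mem_range, PySem.Chars.startswith_iff,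
    PySem.Chars.isIn_iff_infix]
  constructor
  · rintro ⟨i, _, kw, hkw, hpre⟩
    exact ⟨kw, hkw, hpre.isInfix.trans (List.drop_suffix i q).isInfix⟩
  · rintro ⟨kw, hkw, s, t, rfl⟩
    refine ⟨s.length, by simp [List.length_append], kw, hkw, ?_⟩
    rw [List.append_assoc, List.drop_left]
    exact List.prefix_append _ _

-- ===== VERDICT (by name: the statement is the Claim_ definition above) =====
theorem detect_summary_query_spec : Claim_equal_detect_summary_query := by
  intro query _
  show detect_summary_query query = detect_summary_query_alt query
  unfold detect_summary_query detect_summary_query_alt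
  rw [scan_any_eq]
  simp [PySem.Str.isIn_eq, summaryKeywords]
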